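-- pv_equiv track=rewrite | github.com/rkya/ai_golomb_ruler | submit.py | isValueConsistentCP
-- ===== SOURCE A (Python) =====
-- def isValueConsistentCP(value, assignedVariables, distance):
--     newSetValues = set()
--     for marker in assignedVariables:
--         newDistance = abs(value - marker)
--         # Check for consistency i.e. space between every pair of markers is distinct and markers do not overlap
--         if newDistance in distance or newDistance in newSetValues or newDistance == 0:
--             return False, set()
--         newSetValues.add(newDistance)
--
--     if len(assignedVariables) == 0:
--         if value in distance or value in newSetValues:
--             return False, set()
--         newSetValues.add(value)
--     return True, newSetValues
-- ===== SOURCE B (Python) =====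
-- def isValueConsistentCP(value, assignedVariables, distance):
--     if not assignedVariables:
--         if value in distance:
--             return False, set()
--         return True, {value}
--     forbidden = set(distance)
--     ds = [abs(value - m) for m in assignedVariables]
--     # Sort the distances: a zero shows up first (caught by prev == 0) and
--     # duplicates become adjacent, so one linear scan over the sorted list
--     # finds every conflict.
--     prev = 0
--     for d in sorted(ds):
--         if d == prev or d in forbidden:
--             return False, set()
--         prev = d
--     return True, set(ds)
-- ===== Notes on version B (the rewrite author's own statement) =====
-- stated objective: alternative
-- what changed: A detects duplicate distances incrementally with a growing seen-set during one early-exit loop; B instead sorts the distance list and finds zeros and duplicates by a single adjacent-comparison scan over the sorted order (prev pointer), with the forbidden distances pre-indexed as a set.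
import Mathlib
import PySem

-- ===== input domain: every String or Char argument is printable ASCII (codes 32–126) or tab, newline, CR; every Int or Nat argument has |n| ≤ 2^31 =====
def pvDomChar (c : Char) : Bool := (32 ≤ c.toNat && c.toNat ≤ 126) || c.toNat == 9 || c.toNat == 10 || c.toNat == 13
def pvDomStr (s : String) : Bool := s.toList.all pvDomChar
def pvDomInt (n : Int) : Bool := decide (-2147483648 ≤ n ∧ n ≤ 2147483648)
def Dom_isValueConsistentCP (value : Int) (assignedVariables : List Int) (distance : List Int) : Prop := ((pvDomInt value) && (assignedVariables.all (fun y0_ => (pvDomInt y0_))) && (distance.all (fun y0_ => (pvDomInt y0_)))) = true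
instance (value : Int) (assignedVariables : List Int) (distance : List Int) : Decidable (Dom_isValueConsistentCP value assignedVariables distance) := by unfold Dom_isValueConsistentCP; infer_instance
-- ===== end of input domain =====

-- B replaces A's incremental seen-set loop by sorting the distance list and detecting zeros and
-- duplicates with one adjacent-comparison scan over the sorted order; objective: alternative.

-- ===== PORT A =====
-- A's for-loop: state is the growing set newSetValues; none = the early 'return False, set()'
def isvcLoopA (value : Int) (distance : List Int) (s : PySem.Set Int) : List Int → Option (PySem.Set Int)
  | [] => some s
  | marker :: rest =>
      let newDistance := |value - marker|
      if distance.contains newDistance || s.contains newDistance || newDistance == 0 then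
        none
      else
        isvcLoopA value distance (s.add newDistance) rest

def isValueConsistentCP (value : Int) (assignedVariables : List Int) (distance : List Int) : Bool × List Int :=
  match isvcLoopA value distance PySem.Set.empty assignedVariables with
  | none => (false, PySem.Set.empty)
  | some newSetValues =>
      if assignedVariables.length == 0 then
        if distance.contains value || newSetValues.contains value then (false, PySem.Set.empty)
        else (true, newSetValues.add value)
      else (true, newSetValues)

-- ===== PORT B =====
-- B's for-loop over sorted(ds): prev is the previously seen (smaller-or-equal) distance;
-- false = the early 'return False, set()'
def isvcScanB (forbidden : PySem.Set Int) (prev : Int) : List Int → Bool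
  | [] => true
  | d :: rest =>
      if d == prev || forbidden.contains d then false
      else isvcScanB forbidden d rest

def isValueConsistentCP_alt (value : Int) (assignedVariables : List Int) (distance : List Int) : Bool × List Int :=
  if assignedVariables.isEmpty then
    if distance.contains value then (false, PySem.Set.empty)
    else (true, [value])
  else
    let forbidden := PySem.Set.ofList distance
    let ds := assignedVariables.map (fun m => |value - m|)
    if isvcScanB forbidden 0 (PySem.List.sorted ds (fun x => x) false) then (true, PySem.Set.ofList ds)
    else (false, PySem.Set.empty)

-- ===== PRECONDITION & SPEC =====
def Spec_isValueConsistentCP (value : Int) (assignedVariables : List Int) (distance : List Int) (out : Bool × List Int) : Prop := out = isValueConsistentCP_alt value assignedVariables distance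
instance (value : Int) (assignedVariables : List Int) (distance : List Int) (out : Bool × List Int) : Decidable (Spec_isValueConsistentCP value assignedVariables distance out) := by unfold Spec_isValueConsistentCP; infer_instance

-- ===== CLAIM (what is proved, stated in full; the proofs are below) =====
def Claim_equal_isValueConsistentCP : Prop := ∀ (value : Int) (assignedVariables : List Int) (distance : List Int), Dom_isValueConsistentCP value assignedVariables distance → Spec_isValueConsistentCP value assignedVariables distance (isValueConsistentCP value assignedVariables distance)

-- ===== LEMMAS AND PROOFS =====

-- characterisation of A's loop by whole-list conditions on the distance list
theorem isvcLoopA_eq (v : Int) (dist : List Int) :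
    ∀ (l : List Int) (s : PySem.Set Int),
      isvcLoopA v dist s l =
        if (∃ d ∈ l.map (fun m => |v - m|), d ∈ dist ∨ d ∈ s ∨ d = 0)
            ∨ ¬ (l.map (fun m => |v - m|)).Nodup then none
        else some (s.update (l.map (fun m => |v - m|))) := by
  intro l
  induction l with
  | nil =>
      intro s
      simp [isvcLoopA, PySem.Set.update_nil]
  | cons m rest ih =>
      intro s
      simp only [isvcLoopA, List.map_cons]
      by_cases hc : (|v - m| ∈ dist ∨ |v - m| ∈ s) ∨ v - m = 0
      · have hc3 : |v - m| ∈ dist ∨ |v - m| ∈ s ∨ |v - m| = 0 := by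
          rcases hc with (h | h) | h
          exacts [Or.inl h, Or.inr (Or.inl h), Or.inr (Or.inr (abs_eq_zero.mpr h))]
        rw [if_pos (by simpa using hc), if_pos (Or.inl ⟨|v - m|, by simp, hc3⟩)]
      · have hc3 : ¬ (|v - m| ∈ dist ∨ |v - m| ∈ s ∨ |v - m| = 0) := by
          rintro (h | h | h)
          exacts [hc (Or.inl (Or.inl h)), hc (Or.inl (Or.inr h)),
            hc (Or.inr (abs_eq_zero.mp h))]
        rw [if_neg (by simpa using hc), ih]
        have hval : (s.add (|v - m|)).update (List.map (fun m => |v - m|) rest)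
            = s.update (|v - m| :: List.map (fun m => |v - m|) rest) :=
          (PySem.Set.update_cons s _ _).symm
        refine if_congr ?_ rfl (by rw [hval])
        constructor
        · rintro (⟨d, hd, hA | hB | hC⟩ | hN)
          · exact Or.inl ⟨d, by simp [hd], Or.inl hA⟩
          · rcases (PySem.Set.mem_add (s := s) (x := |v - m|) (y := d)).mp hB with h | h
            · exact Or.inl ⟨d, by simp [hd], Or.inr (Or.inl h)⟩
            · subst h
              exact Or.inr (by simp [List.nodup_cons, hd])
          · exact Or.inl ⟨d, by simp [hd], Or.inr (Or.inr hC)⟩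
          · exact Or.inr (by rw [List.nodup_cons]; tauto)
        · rintro (⟨d, hd, hA | hB | hC⟩ | hN)
          · rcases List.mem_cons.mp hd with rfl | hd'
            · exact absurd (Or.inl hA) hc3
            · exact Or.inl ⟨d, hd', Or.inl hA⟩
          · rcases List.mem_cons.mp hd with rfl | hd'
            · exact absurd (Or.inr (Or.inl hB)) hc3
            · exact Or.inl ⟨d, hd', Or.inr (Or.inl ((PySem.Set.mem_add _ _ _).mpr (Or.inl hB)))⟩
          · rcases List.mem_cons.mp hd with rfl | hd'
            · exact absurd (Or.inr (Or.inr hC)) hc3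
            · exact Or.inl ⟨d, hd', Or.inr (Or.inr hC)⟩
          · rw [List.nodup_cons] at hN
            by_cases hm : |v - m| ∈ List.map (fun m => |v - m|) rest
            · exact Or.inl ⟨|v - m|, hm,
                Or.inr (Or.inl ((PySem.Set.mem_add _ _ _).mpr (Or.inr rfl)))⟩
            · exact Or.inr (by tauto)

-- characterisation of B's adjacent scan on a non-decreasing list whose elements all exceed prev
theorem isvcScanB_false_iff (f : PySem.Set Int) :
    ∀ (l : List Int) (prev : Int), l.Pairwise (· ≤ ·) → (∀ x ∈ l, prev ≤ x) →
      (isvcScanB f prev l = false ↔ prev ∈ l ∨ ¬ l.Nodup ∨ ∃ d ∈ l, d ∈ f) := by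
  intro l
  induction l with
  | nil => intro prev _ _; simp [isvcScanB]
  | cons d rest ih =>
      intro prev hpw hlb
      rw [List.pairwise_cons] at hpw
      by_cases hc : d = prev ∨ d ∈ f
      · have hcond : (d == prev || f.contains d) = true := by
          rcases hc with h | h
          · simp [h]
          · have hct : f.contains d = true := by simpa [PySem.Set.contains] using h
            simp only [Bool.or_eq_true]
            exact Or.inr hct
        have : isvcScanB f prev (d :: rest) = false := by
          show (if (d == prev || f.contains d) = true then false else isvcScanB f d rest) = false
          rw [hcond]
          rfl
        rw [this]
        simp only [true_iff]
        rcases hc with h | h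
        · exact Or.inl (by simp [h.symm])
        · exact Or.inr (Or.inr ⟨d, by simp, h⟩)
      · push Not at hc
        obtain ⟨hne, hnf⟩ := hc
        have hstep : isvcScanB f prev (d :: rest) = isvcScanB f d rest := by
          have hfc : f.contains d = false := by
            simpa [PySem.Set.contains] using hnf
          have hcond : (d == prev || f.contains d) = false := by
            rw [hfc]
            simp [hne]
          show (if (d == prev || f.contains d) = true then false else isvcScanB f d rest)
              = isvcScanB f d rest
          rw [hcond]
          rfl
        have hlt : prev < d := lt_of_le_of_ne (hlb d (by simp)) (Ne.symm hne)
        have hprev : prev ∉ rest := fun h => absurd (lt_of_lt_of_le hlt (hpw.1 _ h)) (lt_irrefl _)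
        rw [hstep, ih d hpw.2 hpw.1]
        constructor
        · rintro (h | h | h)
          · exact Or.inr (Or.inl (by simp [List.nodup_cons]; tauto))
          · exact Or.inr (Or.inl (by simp [List.nodup_cons]; tauto))
          · exact Or.inr (Or.inr (by obtain ⟨x, hx, hxf⟩ := h; exact ⟨x, by simp [hx], hxf⟩))
        · rintro (h | h | ⟨x, hx, hxf⟩)
          · rcases List.mem_cons.mp h with rfl | h'
            exacts [absurd rfl hne.symm, absurd h' hprev]
          · rw [List.nodup_cons] at h
            by_cases hd : d ∈ rest
            · exact Or.inl hd
            · exact Or.inr (Or.inl (by tauto))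
          · rcases List.mem_cons.mp hx with rfl | hx'
            exacts [absurd hxf hnf, Or.inr (Or.inr ⟨x, hx', hxf⟩)]

theorem isValueConsistentCP_spec : Claim_equal_isValueConsistentCP := by
  intro v av dist _
  unfold Spec_isValueConsistentCP
  cases av with
  | nil =>
      simp [isValueConsistentCP, isValueConsistentCP_alt, isvcLoopA, PySem.Set.empty,
        PySem.Set.add, PySem.Set.contains]
  | cons m rest =>
      set ds := (m :: rest).map (fun x => |v - x|) with hds
      set sds := PySem.List.sorted ds (fun x => x) false with hsds
      have hperm : sds.Perm ds := PySem.List.sorted_perm ..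
      have hpw : sds.Pairwise (· ≤ ·) := by
        simpa using PySem.List.sorted_pairwise (xs := ds) (key := fun x => x)
      have hlb : ∀ x ∈ sds, (0 : Int) ≤ x := by
        intro x hx
        have := hperm.mem_iff.mp hx
        rw [hds] at this
        obtain ⟨y, _, rfl⟩ := List.mem_map.mp this
        exact abs_nonneg _
      have hiff := isvcScanB_false_iff (PySem.Set.ofList dist) sds 0 hpw hlb
      have hEmpty : ((m :: rest).isEmpty) = false := rfl
      have hlen : ((m :: rest).length == 0) = false := by simp
      simp only [isValueConsistentCP, isValueConsistentCP_alt, isvcLoopA_eq, hEmpty,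
        Bool.false_eq_true, if_false, hlen, ← hds, ← hsds]
      have hcond : ((∃ d ∈ ds, d ∈ dist ∨ d ∈ (PySem.Set.empty : PySem.Set Int) ∨ d = 0)
            ∨ ¬ ds.Nodup)
          ↔ (isvcScanB (PySem.Set.ofList dist) 0 sds = false) := by
        rw [hiff]
        constructor
        · rintro (⟨d, hd, hA | hB | hC⟩ | hN)
          · exact Or.inr (Or.inr ⟨d, hperm.mem_iff.mpr hd, (PySem.Set.mem_ofList ..).mpr hA⟩)
          · exact absurd hB (by simp [PySem.Set.empty])
          · exact Or.inl (hperm.mem_iff.mpr (hC ▸ hd))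
          · exact Or.inr (Or.inl (fun h => hN (hperm.nodup_iff.mp h)))
        · rintro (h | h | ⟨d, hd, hf⟩)
          · exact Or.inl ⟨0, hperm.mem_iff.mp h, Or.inr (Or.inr rfl)⟩
          · exact Or.inr (fun hn => h (hperm.nodup_iff.mpr hn))
          · exact Or.inl ⟨d, hperm.mem_iff.mp hd, Or.inl ((PySem.Set.mem_ofList ..).mp hf)⟩
      by_cases hB : isvcScanB (PySem.Set.ofList dist) 0 sds = false
      · rw [if_pos (hcond.mpr hB), hB]
        simp
      · rw [if_neg (fun h => hB (hcond.mp h))]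
        rw [Bool.not_eq_false] at hB
        rw [hB, if_pos rfl]
        exact congrArg (fun s => (true, s)) (PySem.Set.update_nil_left _)
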